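-- pv_equiv track=rewrite | github.com/pranav-c-r/cellexis | backend/ingestion/extract_text.py | simple_paragraph_reconstruction
-- ===== SOURCE A (Python) =====
-- def simple_paragraph_reconstruction(lines):
--     """SIMPLE and RELIABLE paragraph reconstruction"""
--     if not lines:
--         return []
--
--     paragraphs = []
--     current_paragraph = []
--
--     for line in lines:
--         line = line.strip()
--         if not line:
--             # Empty line indicates paragraph break
--             if current_paragraph:
--                 paragraphs.append(' '.join(current_paragraph))
--                 current_paragraph = []
--             continue
--
--         # Check if this line looks like the start of a new paragraph
--         is_new_paragraph = (
--             not current_paragraph or  # First line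
--             len(line) < 50 or  # Short line (might be heading)
--             line[0].isupper() and not current_paragraph[-1].endswith(('.', '!', '?')) or  # Capital start without sentence end
--             any(line.lower().startswith(keyword) for keyword in [
--                 'introduction', 'methods', 'results', 'discussion', 'conclusion',
--                 'abstract', 'background', 'objective', 'aim', 'purpose'
--             ])
--         )
--
--         if is_new_paragraph and current_paragraph:
--             paragraphs.append(' '.join(current_paragraph))
--             current_paragraph = [line]
--         else:
--             current_paragraph.append(line)
--
--     # Don't forget the last paragraph
--     if current_paragraph:
--         paragraphs.append(' '.join(current_paragraph))
--
--     return paragraphs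
-- ===== SOURCE B (Python) =====
-- _KEYWORDS = ('introduction', 'methods', 'results', 'discussion', 'conclusion',
--              'abstract', 'background', 'objective', 'aim', 'purpose')
--
--
-- def _boundary(line, prev):
--     """Does `line` start a new sub-paragraph, given the previous line of its block?"""
--     return (len(line) < 50
--             or (line[0].isupper() and not prev.endswith(('.', '!', '?')))
--             or line.lower().startswith(_KEYWORDS))
--
--
-- def simple_paragraph_reconstruction(lines):
--     """SIMPLE and RELIABLE paragraph reconstruction (two-pass: block split, then group)."""
--     stripped = [ln.strip() for ln in lines]
--     # Pass 1: blank-delimited blocks of non-empty stripped lines.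
--     blocks = []
--     i, n = 0, len(stripped)
--     while i < n:
--         if not stripped[i]:
--             i += 1
--             continue
--         j = i
--         while j < n and stripped[j]:
--             j += 1
--         blocks.append(stripped[i:j])
--         i = j
--     # Pass 2: split each block into sub-paragraphs at boundary lines, then join.
--     out = []
--     for block in blocks:
--         groups = [[block[0]]]
--         for prev, line in zip(block, block[1:]):
--             if _boundary(line, prev):
--                 groups.append([line])
--             else:
--                 groups[-1].append(line)
--         out.extend(' '.join(g) for g in groups)
--     return out
-- ===== Notes on version B (the rewrite author's own statement) =====
-- stated objective: alternative
-- what changed: Replaces A's single accumulate-and-flush loop with two shaped passes: first split the stripped lines into blank-delimited blocks, then split each block into sub-paragraphs at boundary lines (comparing each line to the previous block line) and join the groups.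
import Mathlib
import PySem

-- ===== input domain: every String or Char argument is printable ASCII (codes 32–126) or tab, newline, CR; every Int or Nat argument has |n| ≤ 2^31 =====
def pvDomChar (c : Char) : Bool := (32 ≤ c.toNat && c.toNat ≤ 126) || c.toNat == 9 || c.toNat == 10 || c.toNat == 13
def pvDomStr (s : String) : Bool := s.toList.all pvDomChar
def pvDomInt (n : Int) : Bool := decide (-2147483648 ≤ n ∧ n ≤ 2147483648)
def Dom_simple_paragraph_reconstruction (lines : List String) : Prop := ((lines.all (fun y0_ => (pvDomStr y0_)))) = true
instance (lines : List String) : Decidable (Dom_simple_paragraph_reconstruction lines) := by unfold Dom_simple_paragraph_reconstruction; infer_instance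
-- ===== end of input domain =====

-- B reconstructs the same paragraphs in two passes (blank-delimited blocks, then boundary grouping)
-- instead of A's single accumulate-and-flush loop; objective: alternative decomposition (no speed claim).

-- ===== PORT A =====
def aKeywords : List String :=
  ["introduction", "methods", "results", "discussion", "conclusion",
   "abstract", "background", "objective", "aim", "purpose"]

-- line[0].isupper() and not current_paragraph[-1].endswith(('.','!','?'))
def aIsNew (line : String) (cur : List String) : Bool :=
  cur.isEmpty
  || decide (PySem.Str.len line < 50)
  || ((match PySem.Str.pyGet? line 0 with
       | some c => PySem.Chars.isupper c
       | none => false)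
      && !(match PySem.List.pyGet? cur (-1) with
           | some p => PySem.Str.endswith p "." || PySem.Str.endswith p "!" || PySem.Str.endswith p "?"
           | none => false))
  || aKeywords.any (fun k => PySem.Str.startswith (PySem.Str.lower line) k)

-- the for-loop of A: state = (paragraphs so far, current_paragraph); final flush at []
def aLoop : List String → List String → List String → List String
  | [], paras, cur =>
      if cur.isEmpty then paras else paras ++ [PySem.Str.join " " cur]
  | l :: ls, paras, cur =>
      let line := PySem.Str.strip l
      if line = "" then
        if cur.isEmpty then aLoop ls paras cur
        else aLoop ls (paras ++ [PySem.Str.join " " cur]) []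
      else
        if aIsNew line cur && !cur.isEmpty then
          aLoop ls (paras ++ [PySem.Str.join " " cur]) [line]
        else
          aLoop ls paras (cur ++ [line])

def simple_paragraph_reconstruction (lines : List String) : List String :=
  if lines = [] then [] else aLoop lines [] []

-- ===== PORT B =====
def bKeywords : List String :=
  ["introduction", "methods", "results", "discussion", "conclusion",
   "abstract", "background", "objective", "aim", "purpose"]

-- does `line` start a new sub-paragraph, given the previous line of its block?
def bBoundary (line prev : String) : Bool :=
  decide (PySem.Str.len line < 50)
  || ((match PySem.Str.pyGet? line 0 with
       | some c => PySem.Chars.isupper c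
       | none => false)
      && !(PySem.Str.endswith prev "." || PySem.Str.endswith prev "!" || PySem.Str.endswith prev "?"))
  || bKeywords.any (fun k => PySem.Str.startswith (PySem.Str.lower line) k)

-- pass 1: blank-delimited blocks of non-empty stripped lines
def bNonblank (s : String) : Bool := s != ""

def bBlocks : List String → List (List String)
  | [] => []
  | s :: rest =>
      if s = "" then bBlocks rest
      else (s :: rest.takeWhile bNonblank) :: bBlocks (rest.dropWhile bNonblank)
termination_by ss => ss.length
decreasing_by
  · simp
  · have := List.length_dropWhile_le bNonblank rest
    simp at this ⊢; omega

-- pass 2: split a block into groups at boundary lines (prev = previous block line)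
def bGroup : List String → String → List String → List (List String)
  | [], _, cur => [cur]
  | l :: rest, prev, cur =>
      if bBoundary l prev then cur :: bGroup rest l [l]
      else bGroup rest l (cur ++ [l])

def bGroupBlock : List String → List (List String)
  | [] => []
  | h :: t => bGroup t h [h]

def simple_paragraph_reconstruction_alt (lines : List String) : List String :=
  (((lines.map PySem.Str.strip) |> bBlocks).flatMap bGroupBlock).map (PySem.Str.join " ")

-- ===== PRECONDITION & SPEC =====
def Spec_simple_paragraph_reconstruction (lines : List String) (out : List String) : Prop := out = simple_paragraph_reconstruction_alt lines
instance (lines : List String) (out : List String) : Decidable (Spec_simple_paragraph_reconstruction lines out) := by unfold Spec_simple_paragraph_reconstruction; infer_instance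

-- ===== CLAIM (what is proved, stated in full; the proofs are below) =====
def Claim_equal_simple_paragraph_reconstruction : Prop := ∀ (lines : List String), Dom_simple_paragraph_reconstruction lines → Spec_simple_paragraph_reconstruction lines (simple_paragraph_reconstruction lines)

-- ===== LEMMAS AND PROOFS =====

-- the result A's loop still produces from state (paragraphs = [], current = cur), phrased
-- with B's two passes; `ls` here is the already-stripped remainder of the input
def pvRest (ls cur : List String) : List String :=
  match cur.getLast? with
  | none => ((bBlocks ls).flatMap bGroupBlock).map (PySem.Str.join " ")
  | some prev =>
      (bGroup (ls.takeWhile bNonblank) prev cur).map (PySem.Str.join " ")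
        ++ ((bBlocks (ls.dropWhile bNonblank)).flatMap bGroupBlock).map (PySem.Str.join " ")

theorem tw_blank (t : List String) : (""::t).takeWhile bNonblank = [] := by
  simp [bNonblank]
theorem dw_blank (t : List String) : (""::t).dropWhile bNonblank = "" :: t := by
  simp [bNonblank]
theorem tw_cons (s : String) (t : List String) (h : s ≠ "") :
    (s::t).takeWhile bNonblank = s :: t.takeWhile bNonblank := by
  simp [bNonblank, h]
theorem dw_cons (s : String) (t : List String) (h : s ≠ "") :
    (s::t).dropWhile bNonblank = t.dropWhile bNonblank := by
  simp [bNonblank, h]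
theorem bBlocks_blank (t : List String) : bBlocks (""::t) = bBlocks t := by
  rw [bBlocks]; simp
theorem bBlocks_cons (s : String) (t : List String) (h : s ≠ "") :
    bBlocks (s::t) = (s :: t.takeWhile bNonblank) :: bBlocks (t.dropWhile bNonblank) := by
  rw [bBlocks]; simp [h]

-- A's accumulator splits off
theorem aLoop_acc (ls : List String) : ∀ (paras cur : List String),
    aLoop ls paras cur = paras ++ aLoop ls [] cur := by
  induction ls with
  | nil => intro paras cur; by_cases h : cur.isEmpty <;> simp [aLoop, h]
  | cons l ls ih =>
      intro paras cur
      simp only [aLoop]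
      by_cases h1 : PySem.Str.strip l = "" <;> simp only [h1, if_true, if_false]
      · by_cases h2 : cur.isEmpty <;> simp only [h2, if_true, Bool.false_eq_true, if_false]
        · exact ih paras cur
        · simp only [List.nil_append]
          rw [ih (paras ++ [PySem.Str.join " " cur]) [], ih [PySem.Str.join " " cur] []]
          simp
      · by_cases h3 : (aIsNew (PySem.Str.strip l) cur && !cur.isEmpty) = true <;>
          simp only [h3, if_true, Bool.false_eq_true, if_false]
        · simp only [List.nil_append]
          rw [ih (paras ++ [PySem.Str.join " " cur]) [PySem.Str.strip l],
              ih [PySem.Str.join " " cur] [PySem.Str.strip l]]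
          simp
        · exact ih paras (cur ++ [PySem.Str.strip l])

-- A's new-paragraph test, on a nonempty current paragraph, is B's boundary test against its last line
theorem aIsNew_eq_bBoundary (line prev : String) (cur : List String)
    (h : cur.getLast? = some prev) :
    aIsNew line cur = bBoundary line prev := by
  have hne : cur ≠ [] := by intro he; simp [he] at h
  have hemp : cur.isEmpty = false := by simpa [List.isEmpty_iff] using hne
  simp only [aIsNew, bBoundary, hemp, PySem.List.pyGet?_neg_one, h, aKeywords, bKeywords,
    Bool.false_or]

-- the joint invariant: A's loop from (paragraphs = [], current = cur) computes pvRest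
theorem aLoop_eq (ls : List String) : ∀ (cur : List String),
    aLoop ls [] cur = pvRest (ls.map PySem.Str.strip) cur := by
  induction ls with
  | nil =>
      intro cur
      cases hc : cur.getLast? with
      | none =>
          have hcur : cur = [] := by simpa using hc
          simp [hcur, aLoop, pvRest, bBlocks]
      | some prev =>
          have hne : cur ≠ [] := by intro he; simp [he] at hc
          have hemp : cur.isEmpty = false := by simpa [List.isEmpty_iff] using hne
          simp [aLoop, hemp, pvRest, hc, bGroup, bBlocks]
  | cons l ls ih =>
      intro cur
      simp only [aLoop, List.map_cons]
      by_cases h1 : PySem.Str.strip l = ""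
      · -- blank stripped line: flush
        simp only [h1, if_true]
        cases hc : cur.getLast? with
        | none =>
            have hcur : cur = [] := by simpa using hc
            subst hcur
            simp only [List.isEmpty_nil, if_true]
            rw [ih []]
            simp [pvRest, bBlocks_blank]
        | some prev =>
            have hne : cur ≠ [] := by intro he; simp [he] at hc
            have hemp : cur.isEmpty = false := by simpa [List.isEmpty_iff] using hne
            simp only [hemp, Bool.false_eq_true, if_false]
            rw [aLoop_acc, ih []]
            simp [pvRest, hc, tw_blank, dw_blank, bBlocks_blank, bGroup]
      · -- non-blank stripped line
        simp only [h1, if_false]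
        cases hc : cur.getLast? with
        | none =>
            have hcur : cur = [] := by simpa using hc
            subst hcur
            simp only [List.isEmpty_nil, Bool.not_true, Bool.and_false, Bool.false_eq_true,
              if_false, List.nil_append]
            rw [ih [PySem.Str.strip l]]
            simp [pvRest, bBlocks_cons _ _ h1, bGroupBlock]
        | some prev =>
            have hne : cur ≠ [] := by intro he; simp [he] at hc
            have hemp : cur.isEmpty = false := by simpa [List.isEmpty_iff] using hne
            have hb := aIsNew_eq_bBoundary (PySem.Str.strip l) prev cur hc
            simp only [hemp, Bool.not_false, Bool.and_true, hb]
            by_cases h3 : bBoundary (PySem.Str.strip l) prev = true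
            · simp only [h3, if_true]
              rw [aLoop_acc, ih [PySem.Str.strip l]]
              simp [pvRest, hc, tw_cons _ _ h1, dw_cons _ _ h1, bGroup, h3]
            · simp only [h3, Bool.false_eq_true, if_false]
              rw [ih (cur ++ [PySem.Str.strip l])]
              simp [pvRest, hc, tw_cons _ _ h1, dw_cons _ _ h1, bGroup, h3,
                List.getLast?_append]

-- ===== VERDICT (by name: the statement is the Claim_ definition above) =====
theorem simple_paragraph_reconstruction_spec : Claim_equal_simple_paragraph_reconstruction := by
  intro lines _
  unfold Spec_simple_paragraph_reconstruction simple_paragraph_reconstruction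
    simple_paragraph_reconstruction_alt
  by_cases h : lines = []
  · simp [h, bBlocks]
  · rw [if_neg h, aLoop_eq lines []]
    simp [pvRest]
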